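-- pv_equiv track=rewrite | github.com/Mole1803/SPoRT | SeaPortOptimizerBackend/src/Solver/MoritzSolver.py | calculate_max_rounds_from_array
-- ===== SOURCE A (Python) =====
-- def calculate_max_rounds_from_array(solution: list[list]) -> int:
--     _solution = sum([list(ele) for ele in solution], [])
--     _map = {}
--     for element in _solution:
--         if element in _map:
--             _map[element] += 1
--         else:
--             _map[element] = 1
--
--     return max(_map.values())
-- ===== SOURCE B (Python) =====
-- def calculate_max_rounds_from_array(solution: list[list]) -> int:
--     # Sort the flattened values, then scan once counting the longest run of
--     # equal adjacent elements (= the maximal frequency).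
--     flat = sorted(v for row in solution for v in row)
--     best = cur = 0
--     prev = None
--     for v in flat:
--         cur = cur + 1 if prev is not None and v == prev else 1
--         if cur > best:
--             best = cur
--         prev = v
--     return best
-- ===== Notes on version B (the rewrite author's own statement) =====
-- stated objective: faster
-- what changed: Replaces the dict-of-counts plus max(values) with sort-then-single-scan: the flattened list is sorted and one pass keeps the longest streak of equal adjacent elements.
-- crash fix: On inputs whose flattened list is empty A raises ValueError (max of an empty sequence) while B returns 0. — e.g. on calculate_max_rounds_from_array([[]]): A raises ValueError, B returns 0
import Mathlib
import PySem

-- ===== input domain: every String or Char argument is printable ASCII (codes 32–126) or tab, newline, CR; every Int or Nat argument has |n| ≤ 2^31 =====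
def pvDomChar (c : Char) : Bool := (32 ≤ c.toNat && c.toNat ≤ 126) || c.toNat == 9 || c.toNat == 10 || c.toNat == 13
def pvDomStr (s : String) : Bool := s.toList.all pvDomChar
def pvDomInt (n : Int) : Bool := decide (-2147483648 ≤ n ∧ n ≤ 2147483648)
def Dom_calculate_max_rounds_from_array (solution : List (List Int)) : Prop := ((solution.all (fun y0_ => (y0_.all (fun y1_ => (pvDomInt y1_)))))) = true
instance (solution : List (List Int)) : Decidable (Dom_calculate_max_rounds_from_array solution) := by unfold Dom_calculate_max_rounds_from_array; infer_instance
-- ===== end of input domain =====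

-- B changes the algorithm: instead of a dict of counts and max(values), it sorts the
-- flattened list and scans once for the longest run of equal adjacent elements
-- (objective: alternative; where A raises on an empty flatten, B returns 0).

-- ===== PORT A =====
def calculate_max_rounds_from_array (solution : List (List Int)) : Int :=
  let _solution := (solution.map (fun ele => ele.map (fun x => x))).foldl (fun a b => a ++ b) []
  let _map := _solution.foldl
    (fun m element =>
      if (m.get? element).isSome then m.insert element (m.getD element 0 + 1)
      else m.insert element 1)
    (PySem.Dict.empty)
  -- max(_map.values()); none = ValueError on an empty dict, excluded by Pre_
  (PySem.List.max? _map.values (fun x => x)).getD 0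

-- ===== PORT B =====
-- one loop step of Source B: state (best, cur, prev)
def pvStep (st : Int × Int × Option Int) (v : Int) : Int × Int × Option Int :=
  let cur' : Int := if some v == st.2.2 then st.2.1 + 1 else 1
  ((if cur' > st.1 then cur' else st.1), cur', some v)

def calculate_max_rounds_from_array_alt (solution : List (List Int)) : Int :=
  let flat := PySem.List.sorted (solution.flatMap (fun row => row)) (fun x => x) false
  (flat.foldl pvStep (0, 0, none)).1

-- ===== PRECONDITION & SPEC =====
-- Pre_ excludes exactly the inputs whose flattened list is empty: there A raises
-- ValueError (max of an empty sequence).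
def Pre_calculate_max_rounds_from_array (solution : List (List Int)) : Prop :=
  solution.flatten ≠ []
instance (solution : List (List Int)) : Decidable (Pre_calculate_max_rounds_from_array solution) := by unfold Pre_calculate_max_rounds_from_array; infer_instance

def pvWitness_calculate_max_rounds_from_array : List (List Int) := [[1, 2], [2, 3]]

-- On inputs whose flattened list is empty A raises ValueError while B returns 0.
def Raises_calculate_max_rounds_from_array (solution : List (List Int)) : Prop :=
  solution.flatten = []
instance (solution : List (List Int)) : Decidable (Raises_calculate_max_rounds_from_array solution) := by unfold Raises_calculate_max_rounds_from_array; infer_instance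
def pvRaiseWitness_calculate_max_rounds_from_array : List (List Int) := [[]]
def pvRaiseWitnessOut_calculate_max_rounds_from_array : Int := 0

def Spec_calculate_max_rounds_from_array (solution : List (List Int)) (out : Int) : Prop := out = calculate_max_rounds_from_array_alt solution
instance (solution : List (List Int)) (out : Int) : Decidable (Spec_calculate_max_rounds_from_array solution out) := by unfold Spec_calculate_max_rounds_from_array; infer_instance

-- ===== CLAIM (what is proved, stated in full; the proofs are below) =====
def Claim_equal_calculate_max_rounds_from_array : Prop := ∀ (solution : List (List Int)), Dom_calculate_max_rounds_from_array solution → Pre_calculate_max_rounds_from_array solution → Spec_calculate_max_rounds_from_array solution (calculate_max_rounds_from_array solution)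

def Claim_raises_calculate_max_rounds_from_array : Prop := (∀ (solution : List (List Int)), Dom_calculate_max_rounds_from_array solution → Raises_calculate_max_rounds_from_array solution → ¬ Pre_calculate_max_rounds_from_array solution) ∧ (Dom_calculate_max_rounds_from_array (pvRaiseWitness_calculate_max_rounds_from_array) ∧ Raises_calculate_max_rounds_from_array (pvRaiseWitness_calculate_max_rounds_from_array) ∧ calculate_max_rounds_from_array_alt (pvRaiseWitness_calculate_max_rounds_from_array) = pvRaiseWitnessOut_calculate_max_rounds_from_array)

-- ===== LEMMAS AND PROOFS =====

-- "r is the maximal multiplicity in l": the common specification both ports satisfy.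
def pvP (l : List Int) (r : Int) : Prop :=
  (∀ x ∈ l, (l.count x : Int) ≤ r) ∧ (∃ x ∈ l, (l.count x : Int) = r)

lemma pvP_unique {l : List Int} {r r' : Int} (h : pvP l r) (h' : pvP l r') : r = r' := by
  obtain ⟨hle, x, hx, hxr⟩ := h
  obtain ⟨hle', y, hy, hyr⟩ := h'
  have := hle y hy; have := hle' x hx; omega

-- max multiplicity of a sorted list, by run decomposition
def pvM : List Int → Int
  | [] => 0
  | a :: t => max (1 + (t.count a : Int)) (pvM (t.dropWhile (· == a)))
termination_by l => l.length
decreasing_by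
  simpa using Nat.lt_succ_of_le (List.length_dropWhile_le _ _)

lemma pvM_nonneg (s : List Int) : 0 ≤ pvM s := by
  induction s using pvM.induct with
  | case1 => simp [pvM]
  | case2 a t ih =>
    rw [pvM]
    have : (0:Int) ≤ (t.count a : Int) := Int.natCast_nonneg _
    omega

-- sum([list(ele) for ele in solution], []) is the flattening
lemma pv_flatten (solution : List (List Int)) :
    (solution.map (fun ele => ele.map (fun x => x))).foldl (fun a b => a ++ b) [] = solution.flatten := by
  have gen : ∀ (L : List (List Int)) (a : List Int), L.foldl (fun a b => a ++ b) a = a ++ L.flatten := by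
    intro L; induction L with
    | nil => simp
    | cons h t ih => intro a; simp [List.foldl_cons, ih]
  simp [List.map_id', gen]

-- A's counting loop followed by max(values) yields the maximal multiplicity
lemma pvA_sat (l : List Int) (hl : l ≠ []) :
    pvP l ((PySem.List.max?
      (l.foldl (fun m element =>
        if (m.get? element).isSome then m.insert element (m.getD element 0 + 1)
        else m.insert element 1) (PySem.Dict.empty)).values (fun x => x)).getD 0) := by
  have hfun : (fun (m : PySem.Dict Int Int) element =>
      if (m.get? element).isSome then m.insert element (m.getD element 0 + 1)
      else m.insert element 1)
      = fun m element => m.insert element (m.getD element 0 + 1) := by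
    funext m e
    by_cases h : (m.get? e).isSome
    · simp [h]
    · have hz : m.getD e 0 = 0 := by
        simp [PySem.Dict.getD, Option.isSome_eq_false_iff] at h ⊢
        simp [h]
      simp [h, hz]
  rw [hfun, PySem.Dict.foldl_insert_getD_add_one_eq_counter]
  have hvals : (PySem.Dict.counter l).values = (PySem.Set.ofList l).map (fun k => (l.count k : Int)) := by
    simp only [PySem.Dict.values, PySem.Dict.items_counter, List.map_map]
    rfl
  rw [hvals]
  obtain ⟨a, t, rfl⟩ := List.exists_cons_of_ne_nil hl
  have hmem : a ∈ PySem.Set.ofList (a :: t) := by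
    rw [PySem.Set.mem_ofList]; exact List.mem_cons_self
  have hne2 : (PySem.Set.ofList (a :: t)).map (fun k => ((a :: t).count k : Int)) ≠ [] := by
    simp; intro h; rw [h] at hmem; simp at hmem
  cases hm : PySem.List.max? ((PySem.Set.ofList (a :: t)).map fun k => (((a :: t).count k : Int))) (fun x => x) with
  | none => exact absurd ((PySem.List.max?_eq_none_iff _ _).mp hm) hne2
  | some m =>
  simp only [Option.getD_some]
  constructor
  · intro x hx
    have : ((a :: t).count x : Int) ∈ (PySem.Set.ofList (a :: t)).map (fun k => ((a :: t).count k : Int)) := by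
      exact List.mem_map_of_mem (by rw [PySem.Set.mem_ofList]; exact hx)
    exact PySem.List.max?_isMax hm _ this
  · have := PySem.List.max?_mem hm
    obtain ⟨k, hk, hkm⟩ := List.mem_map.mp this
    exact ⟨k, (PySem.Set.mem_ofList _ _).mp hk, hkm⟩

-- the streak loop on a sorted remainder, with the previous element and running state
lemma pv_streak (s : List Int) (p best cur : Int)
    (hs : s.Pairwise (· ≤ ·)) (hp : ∀ x ∈ s, p ≤ x)
    (h1 : 1 ≤ cur) (h2 : cur ≤ best) :
    (s.foldl pvStep (best, cur, some p)).1
      = max best (max (cur + (s.count p : Int)) (pvM (s.dropWhile (· == p)))) := by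
  induction s generalizing p best cur with
  | nil => simp [h2, pvM]; omega
  | cons v t ih =>
    rw [List.pairwise_cons] at hs
    obtain ⟨hvle, ht⟩ := hs
    by_cases hv : v = p
    · subst hv
      have hstep : pvStep (best, cur, some v) v = (max best (cur + 1), cur + 1, some v) := by
        simp [pvStep]; omega
      rw [List.foldl_cons, hstep,
        ih v (max best (cur+1)) (cur+1) ht hvle (by omega) (le_max_right _ _)]
      have hcnt : ((v :: t).count v : Int) = (t.count v : Int) + 1 := by
        simp [List.count_cons_self]
      have hdw : (v :: t).dropWhile (· == v) = t.dropWhile (· == v) := by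
        simp [List.dropWhile]
      rw [hcnt, hdw]
      have c0 : (0:Int) ≤ (t.count v : Int) := Int.natCast_nonneg _
      simp only [max_def]; split_ifs <;> omega
    · have hstep : pvStep (best, cur, some p) v = (best, 1, some v) := by
        have : (some v == some p) = false := by simp [hv]
        simp [pvStep, this]; omega
      rw [List.foldl_cons, hstep, ih v best 1 ht hvle le_rfl (by omega)]
      have hpt : t.count p = 0 := by
        rw [List.count_eq_zero]
        intro hmem
        exact hv (le_antisymm (hvle p hmem) (hp v List.mem_cons_self))
      have hcnt : ((v :: t).count p : Int) = 0 := by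
        simp [hpt, hv]
      have hvpf : (v == p) = false := by simp [hv]
      have hdw : (v :: t).dropWhile (· == p) = v :: t := by
        simp [List.dropWhile, hvpf]
      rw [hcnt, hdw]
      rw [show pvM (v :: t) = max (1 + (t.count v : Int)) (pvM (t.dropWhile (· == v))) from by rw [pvM]]
      have c0 : (0:Int) ≤ (t.count v : Int) := Int.natCast_nonneg _
      have m0 := pvM_nonneg (t.dropWhile (· == v))
      simp only [max_def]; split_ifs <;> omega

-- pvM of a nonempty sorted list is the maximal multiplicity
lemma pvM_sat (s : List Int) (hs : s.Pairwise (· ≤ ·)) (hne : s ≠ []) :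
    pvP s (pvM s) := by
  induction s using pvM.induct with
  | case1 => exact absurd rfl hne
  | case2 a t ih =>
    rw [List.pairwise_cons] at hs
    obtain ⟨hale, ht⟩ := hs
    set t' := t.dropWhile (· == a) with ht'
    have htw : ∀ x ∈ t.takeWhile (· == a), x = a := by
      intro x hx
      simpa using List.mem_takeWhile_imp hx
    have hsplit : t.takeWhile (· == a) ++ t' = t := List.takeWhile_append_dropWhile
    have ht'sub : ∀ x ∈ t', x ∈ t := by
      intro x hx; rw [← hsplit]; exact List.mem_append_right _ hx
    have ht'p : t'.Pairwise (· ≤ ·) := List.Pairwise.sublist (List.dropWhile_sublist _) ht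
    have hanot : a ∉ t' := by
      intro ha
      cases hh : t' with
      | nil => simp [hh] at ha
      | cons b r =>
        have hb : (b == a) = false := by
          have := List.head?_dropWhile_not (· == a) t
          rw [← ht', hh] at this; simpa using this
        have hba : b ≠ a := by simpa using hb
        rw [hh] at ha ht'p
        rcases List.mem_cons.mp ha with h | h
        · exact hba h.symm
        · rw [List.pairwise_cons] at ht'p
          have hba' : b ≤ a := ht'p.1 a h
          have hab : a ≤ b := hale b (ht'sub b (by rw [hh]; exact List.mem_cons_self))
          exact hba (le_antisymm hba' hab)
    have hcount : ∀ x : Int, x ≠ a → t.count x = t'.count x := by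
      intro x hx
      rw [← hsplit, List.count_append]
      have : (t.takeWhile (· == a)).count x = 0 := by
        rw [List.count_eq_zero]; intro hmem; exact hx (htw x hmem)
      omega
    have hM : pvM (a :: t) = max (1 + (t.count a : Int)) (pvM t') := by rw [pvM]
    constructor
    · intro x hx
      by_cases hxa : x = a
      · rw [hM]
        have hc : ((a :: t).count x : Int) = 1 + (t.count a : Int) := by
          subst hxa; push_cast [List.count_cons_self]; ring
        rw [hc]; exact le_max_left _ _
      · have hxt : x ∈ t := by rcases List.mem_cons.mp hx with h | h; exact absurd h hxa; exact h
        have hxt' : x ∈ t' := by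
          rw [← hsplit] at hxt
          rcases List.mem_append.mp hxt with h | h
          · exact absurd (htw x h) hxa
          · exact h
        have hct : ((a :: t).count x : Int) = (t'.count x : Int) := by
          rw [← hcount x hxa]; simp [Ne.symm hxa]
        have hne' : t' ≠ [] := List.ne_nil_of_mem hxt'
        have := (ih ht'p hne').1 x hxt'
        rw [hM, hct]; exact le_max_of_le_right this
    · by_cases hord : pvM t' ≤ 1 + (t.count a : Int)
      · refine ⟨a, List.mem_cons_self, ?_⟩
        rw [hM, max_eq_left hord]
        simp [List.count_cons_self]; omega
      · push Not at hord
        have hne' : t' ≠ [] := by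
          intro h; rw [h] at hord; simp [pvM] at hord
          have : (0:Int) ≤ (t.count a : Int) := Int.natCast_nonneg _
          omega
        obtain ⟨x, hxt', hxv⟩ := (ih ht'p hne').2
        have hxa : x ≠ a := fun h => hanot (h ▸ hxt')
        refine ⟨x, List.mem_cons_of_mem _ (ht'sub x hxt'), ?_⟩
        rw [hM, max_eq_right (le_of_lt hord)]
        have hct : ((a :: t).count x : Int) = (t'.count x : Int) := by
          rw [← hcount x hxa]; simp [Ne.symm hxa]
        rw [hct]; exact hxv

-- B (sort + streak scan) also yields the maximal multiplicity of the flattening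
lemma pvB_sat (solution : List (List Int)) (h : solution.flatten ≠ []) :
    pvP solution.flatten (calculate_max_rounds_from_array_alt solution) := by
  have hfm : solution.flatMap (fun row => row) = solution.flatten := by
    simp [List.flatMap_def, List.map_id']
  set s := PySem.List.sorted (solution.flatMap (fun row => row)) (fun x => x) false with hsdef
  have hperm : s.Perm solution.flatten := hfm ▸ PySem.List.sorted_perm _ _ _
  have hpw : s.Pairwise (· ≤ ·) := PySem.List.sorted_pairwise _ _
  have hsne : s ≠ [] := by
    intro hnil
    exact h (List.Perm.eq_nil (hnil ▸ hperm.symm))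
  obtain ⟨a, t, hst⟩ := List.exists_cons_of_ne_nil hsne
  have hres : calculate_max_rounds_from_array_alt solution = pvM s := by
    have hu : calculate_max_rounds_from_array_alt solution = (s.foldl pvStep (0, 0, none)).1 := by
      rfl
    rw [hu, hst]
    have hstep : pvStep (0, 0, none) a = (1, 1, some a) := by simp [pvStep]
    rw [List.foldl_cons, hstep]
    have hpw' := hst ▸ hpw
    rw [List.pairwise_cons] at hpw'
    rw [pv_streak t a 1 1 hpw'.2 hpw'.1 le_rfl le_rfl, pvM]
    have c0 : (0:Int) ≤ (t.count a : Int) := Int.natCast_nonneg _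
    have m0 := pvM_nonneg (t.dropWhile (· == a))
    simp only [max_def]; split_ifs <;> omega
  rw [hres]
  obtain ⟨hub, x, hx, hxv⟩ := pvM_sat s hpw hsne
  constructor
  · intro y hy
    have := hub y (hperm.mem_iff.mpr hy)
    rwa [hperm.count_eq] at this
  · exact ⟨x, hperm.mem_iff.mp hx, by rw [← hperm.count_eq]; exact hxv⟩

-- ===== VERDICT (by name: the statement is the Claim_ definition above) =====
theorem calculate_max_rounds_from_array_spec : Claim_equal_calculate_max_rounds_from_array := by
  intro solution _ hpre
  unfold Spec_calculate_max_rounds_from_array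
  have hA : calculate_max_rounds_from_array solution
      = ((PySem.List.max?
        (solution.flatten.foldl (fun m element =>
          if (m.get? element).isSome then m.insert element (m.getD element 0 + 1)
          else m.insert element 1) (PySem.Dict.empty)).values (fun x => x)).getD 0) := by
    simp only [calculate_max_rounds_from_array, pv_flatten]
  rw [hA]
  exact pvP_unique (pvA_sat solution.flatten hpre) (pvB_sat solution hpre)

@[simp] theorem calculate_max_rounds_from_array_raises : Claim_raises_calculate_max_rounds_from_array := by
  unfold Claim_raises_calculate_max_rounds_from_array
  exact ⟨fun s _ h hp => hp h, by decide⟩
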